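-- pv_equiv track=rewrite | github.com/musclesugar/podcast_ai_pipeline | src/config/voices.py | _get_edge_gender
-- ===== SOURCE A (Python) =====
-- EDGE_VOICES = {
--     "popular_male": [
--         "en-US-AndrewNeural",
--         "en-US-BrianNeural",
--         "en-US-ChristopherNeural",
--         "en-US-EricNeural",
--         "en-US-GuyNeural",
--         "en-US-RogerNeural",
--     ],
--     "popular_female": [
--         "en-US-AvaNeural",
--         "en-US-EmmaNeural",
--         "en-US-JennyNeural",
--         "en-US-MichelleNeural",
--         "en-US-MonicaNeural",
--         "en-US-SaraNeural",
--     ],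
--     "international": [
--         "en-GB-RyanNeural",  # British Male
--         "en-GB-SoniaNeural",  # British Female
--         "en-AU-NatashaNeural",  # Australian Female
--         "en-AU-WilliamNeural",  # Australian Male
--         "en-CA-ClaraNeural",  # Canadian Female
--         "en-CA-LiamNeural",  # Canadian Male
--     ],
-- }
--
-- def _get_edge_gender(voice_name: str) -> str:
--     """Determine gender for Edge TTS voice."""
--     if any(
--         voice_name in voices
--         for voices in [EDGE_VOICES["popular_male"], EDGE_VOICES["international"]]
--     ):
--         if any(
--             name in voice_name
--             for name in [
--                 "Andrew",
--                 "Brian",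
--                 "Christopher",
--                 "Eric",
--                 "Guy",
--                 "Roger",
--                 "Ryan",
--                 "William",
--                 "Liam",
--             ]
--         ):
--             return "male"
--     if any(
--         voice_name in voices
--         for voices in [EDGE_VOICES["popular_female"], EDGE_VOICES["international"]]
--     ):
--         if any(
--             name in voice_name
--             for name in [
--                 "Ava",
--                 "Emma",
--                 "Jenny",
--                 "Michelle",
--                 "Monica",
--                 "Sara",
--                 "Sonia",
--                 "Natasha",
--                 "Clara",
--             ]
--         ):
--             return "female"
--     return "unknown"
-- ===== SOURCE B (Python) =====
-- EDGE_VOICES = {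
--     "popular_male": [
--         "en-US-AndrewNeural",
--         "en-US-BrianNeural",
--         "en-US-ChristopherNeural",
--         "en-US-EricNeural",
--         "en-US-GuyNeural",
--         "en-US-RogerNeural",
--     ],
--     "popular_female": [
--         "en-US-AvaNeural",
--         "en-US-EmmaNeural",
--         "en-US-JennyNeural",
--         "en-US-MichelleNeural",
--         "en-US-MonicaNeural",
--         "en-US-SaraNeural",
--     ],
--     "international": [
--         "en-GB-RyanNeural",
--         "en-GB-SoniaNeural",
--         "en-AU-NatashaNeural",
--         "en-AU-WilliamNeural",
--         "en-CA-ClaraNeural",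
--         "en-CA-LiamNeural",
--     ],
-- }
--
-- # One flat table: every known voice name maps directly to its gender.
-- _GENDER_TABLE = {
--     "en-US-AndrewNeural": "male",
--     "en-US-BrianNeural": "male",
--     "en-US-ChristopherNeural": "male",
--     "en-US-EricNeural": "male",
--     "en-US-GuyNeural": "male",
--     "en-US-RogerNeural": "male",
--     "en-GB-RyanNeural": "male",
--     "en-AU-WilliamNeural": "male",
--     "en-CA-LiamNeural": "male",
--     "en-US-AvaNeural": "female",
--     "en-US-EmmaNeural": "female",
--     "en-US-JennyNeural": "female",
--     "en-US-MichelleNeural": "female",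
--     "en-US-MonicaNeural": "female",
--     "en-US-SaraNeural": "female",
--     "en-GB-SoniaNeural": "female",
--     "en-AU-NatashaNeural": "female",
--     "en-CA-ClaraNeural": "female",
-- }
--
--
-- def _get_edge_gender(voice_name: str) -> str:
--     """Determine gender for Edge TTS voice."""
--     return _GENDER_TABLE.get(voice_name, "unknown")
-- ===== Notes on version B (the rewrite author's own statement) =====
-- stated objective: simpler
-- what changed: Replaced the two-phase scan (membership in voice lists, then a substring scan over first names) with a single precomputed flat name-to-gender dict and one lookup with a default result.
import Mathlib
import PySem

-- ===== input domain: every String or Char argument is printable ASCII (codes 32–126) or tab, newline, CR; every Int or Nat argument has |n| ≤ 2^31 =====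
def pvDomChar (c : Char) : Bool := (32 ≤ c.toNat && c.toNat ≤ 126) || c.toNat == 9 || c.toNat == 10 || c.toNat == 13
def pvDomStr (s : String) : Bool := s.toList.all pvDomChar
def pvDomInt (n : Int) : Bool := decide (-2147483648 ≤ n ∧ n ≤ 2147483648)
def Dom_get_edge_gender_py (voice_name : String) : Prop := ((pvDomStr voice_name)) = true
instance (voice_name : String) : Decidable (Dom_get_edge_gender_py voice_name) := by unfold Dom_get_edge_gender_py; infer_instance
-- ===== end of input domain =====

-- B replaces A's membership-then-substring scans with one flat name→gender table lookup (simpler).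

-- ===== PORT A =====
def pvPopularMale : List String :=
  ["en-US-AndrewNeural", "en-US-BrianNeural", "en-US-ChristopherNeural",
   "en-US-EricNeural", "en-US-GuyNeural", "en-US-RogerNeural"]

def pvPopularFemale : List String :=
  ["en-US-AvaNeural", "en-US-EmmaNeural", "en-US-JennyNeural",
   "en-US-MichelleNeural", "en-US-MonicaNeural", "en-US-SaraNeural"]

def pvInternational : List String :=
  ["en-GB-RyanNeural", "en-GB-SoniaNeural", "en-AU-NatashaNeural",
   "en-AU-WilliamNeural", "en-CA-ClaraNeural", "en-CA-LiamNeural"]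

-- the second `if` block of A (reached whenever the first block does not return)
def pvFemaleCheck (voice_name : String) : String :=
  if [pvPopularFemale, pvInternational].any (fun voices => voices.contains voice_name) then
    if ["Ava", "Emma", "Jenny", "Michelle", "Monica", "Sara", "Sonia", "Natasha",
        "Clara"].any (fun name => PySem.Str.isIn name voice_name) then
      "female"
    else "unknown"
  else "unknown"

def get_edge_gender_py (voice_name : String) : String :=
  if [pvPopularMale, pvInternational].any (fun voices => voices.contains voice_name) then
    if ["Andrew", "Brian", "Christopher", "Eric", "Guy", "Roger", "Ryan", "William",
        "Liam"].any (fun name => PySem.Str.isIn name voice_name) then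
      "male"
    else pvFemaleCheck voice_name
  else pvFemaleCheck voice_name

-- ===== PORT B =====
def pvGenderTable : PySem.Dict String String :=
  PySem.Dict.ofList
    [("en-US-AndrewNeural", "male"), ("en-US-BrianNeural", "male"),
     ("en-US-ChristopherNeural", "male"), ("en-US-EricNeural", "male"),
     ("en-US-GuyNeural", "male"), ("en-US-RogerNeural", "male"),
     ("en-GB-RyanNeural", "male"), ("en-AU-WilliamNeural", "male"),
     ("en-CA-LiamNeural", "male"), ("en-US-AvaNeural", "female"),
     ("en-US-EmmaNeural", "female"), ("en-US-JennyNeural", "female"),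
     ("en-US-MichelleNeural", "female"), ("en-US-MonicaNeural", "female"),
     ("en-US-SaraNeural", "female"), ("en-GB-SoniaNeural", "female"),
     ("en-AU-NatashaNeural", "female"), ("en-CA-ClaraNeural", "female")]

def get_edge_gender_py_alt (voice_name : String) : String :=
  PySem.Dict.getD pvGenderTable voice_name "unknown"

-- ===== PRECONDITION & SPEC =====
def Spec_get_edge_gender_py (voice_name : String) (out : String) : Prop := out = get_edge_gender_py_alt voice_name
instance (voice_name : String) (out : String) : Decidable (Spec_get_edge_gender_py voice_name out) := by unfold Spec_get_edge_gender_py; infer_instance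

-- ===== CLAIM (what is proved, stated in full; the proofs are below) =====
def Claim_equal_get_edge_gender_py : Prop := ∀ (voice_name : String), Dom_get_edge_gender_py voice_name → Spec_get_edge_gender_py voice_name (get_edge_gender_py voice_name)

-- ===== LEMMAS AND PROOFS =====

theorem pv_key (v : String) : get_edge_gender_py v = get_edge_gender_py_alt v := by
  by_cases h : v ∈ ("en-US-AndrewNeural" :: "en-US-BrianNeural" ::
      "en-US-ChristopherNeural" :: "en-US-EricNeural" :: "en-US-GuyNeural" ::
      "en-US-RogerNeural" :: "en-GB-RyanNeural" :: "en-AU-WilliamNeural" ::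
      "en-CA-LiamNeural" :: "en-US-AvaNeural" :: "en-US-EmmaNeural" ::
      "en-US-JennyNeural" :: "en-US-MichelleNeural" :: "en-US-MonicaNeural" ::
      "en-US-SaraNeural" :: "en-GB-SoniaNeural" :: "en-AU-NatashaNeural" ::
      ["en-CA-ClaraNeural"] : List String)
  · simp only [List.mem_cons, List.not_mem_nil, or_false] at h
    rcases h with rfl | rfl | rfl | rfl | rfl | rfl | rfl | rfl | rfl | rfl | rfl |
      rfl | rfl | rfl | rfl | rfl | rfl | rfl <;> decide
  · simp only [List.mem_cons, List.not_mem_nil, or_false, not_or] at h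
    obtain ⟨h1, h2, h3, h4, h5, h6, h7, h8, h9, h10, h11, h12, h13, h14, h15, h16, h17, h18⟩ := h
    have htab : pvGenderTable = PySem.Dict.mk
        [("en-US-AndrewNeural", "male"), ("en-US-BrianNeural", "male"),
         ("en-US-ChristopherNeural", "male"), ("en-US-EricNeural", "male"),
         ("en-US-GuyNeural", "male"), ("en-US-RogerNeural", "male"),
         ("en-GB-RyanNeural", "male"), ("en-AU-WilliamNeural", "male"),
         ("en-CA-LiamNeural", "male"), ("en-US-AvaNeural", "female"),
         ("en-US-EmmaNeural", "female"), ("en-US-JennyNeural", "female"),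
         ("en-US-MichelleNeural", "female"), ("en-US-MonicaNeural", "female"),
         ("en-US-SaraNeural", "female"), ("en-GB-SoniaNeural", "female"),
         ("en-AU-NatashaNeural", "female"), ("en-CA-ClaraNeural", "female")] := by rfl
    simp [get_edge_gender_py, get_edge_gender_py_alt, pvFemaleCheck,
      pvPopularMale, pvPopularFemale, pvInternational, htab,
      PySem.Dict.getD_eq_get?_getD, PySem.Dict.get?,
      h1, h2, h3, h4, h5, h6, h7, h8, h9, h10, h11, h12, h13, h14, h15, h16, h17, h18,
      Ne.symm h1, Ne.symm h2, Ne.symm h3, Ne.symm h4, Ne.symm h5, Ne.symm h6,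
      Ne.symm h7, Ne.symm h8, Ne.symm h9, Ne.symm h10, Ne.symm h11, Ne.symm h12,
      Ne.symm h13, Ne.symm h14, Ne.symm h15, Ne.symm h16, Ne.symm h17, Ne.symm h18]

-- ===== VERDICT (by name: the statement is the Claim_ definition above) =====
theorem get_edge_gender_py_spec : Claim_equal_get_edge_gender_py := by
  intro v _
  exact pv_key v
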